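-- pv_equiv track=rewrite | github.com/hypatiav2/usaco_practice | dice.py | beat
-- ===== SOURCE A (Python) =====
-- def beat(x,y):
--   xPoints = 0
--   yPoints = 0
--   noPoints = 0
--   for i in range(4):
--     for m in range(4):
--       if x[i] > y[m]:
--         xPoints+=1
--       elif y[m] > x[i]:
--         yPoints+=1
--       else:
--         noPoints+=1
--   if yPoints > xPoints:
--     return y
--   elif xPoints > yPoints:
--     return x
--   else:
--     return None
-- ===== SOURCE B (Python) =====
-- def beat(x, y):
--     ys = sorted(y[m] for m in range(4))
--     xPoints = 0
--     yPoints = 0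
--     for i in range(4):
--         xi = x[i]
--         lt = 0
--         for v in ys:
--             if v < xi:
--                 lt += 1
--             else:
--                 break
--         gt = 0
--         for v in reversed(ys):
--             if v > xi:
--                 gt += 1
--             else:
--                 break
--         xPoints += lt
--         yPoints += gt
--     if yPoints > xPoints:
--         return y
--     if xPoints > yPoints:
--         return x
--     return None
-- ===== Notes on version B (the rewrite author's own statement) =====
-- stated objective: alternative
-- what changed: B sorts the four y-faces once and counts, for each x face, the strictly-smaller prefix and strictly-greater suffix of that sorted list with early-exit scans, instead of A's nested all-pairs comparison loop.
import Mathlib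
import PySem

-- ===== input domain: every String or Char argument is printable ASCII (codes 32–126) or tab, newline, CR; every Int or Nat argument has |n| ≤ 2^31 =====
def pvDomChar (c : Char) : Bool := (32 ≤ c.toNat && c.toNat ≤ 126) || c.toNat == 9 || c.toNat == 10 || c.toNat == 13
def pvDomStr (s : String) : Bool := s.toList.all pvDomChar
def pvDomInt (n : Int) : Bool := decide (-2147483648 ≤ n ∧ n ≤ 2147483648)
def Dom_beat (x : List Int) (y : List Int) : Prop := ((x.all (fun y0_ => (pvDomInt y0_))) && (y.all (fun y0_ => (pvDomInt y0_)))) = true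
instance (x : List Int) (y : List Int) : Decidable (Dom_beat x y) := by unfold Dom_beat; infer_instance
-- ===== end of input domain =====

-- B re-implements 'beat' by sorting the first four faces of y once and, per face of x, counting
-- the strictly-smaller prefix and strictly-greater (reversed) prefix of the sorted list with
-- break-out scans, replacing A's nested pairwise comparison; objective: alternative, not faster.

-- ===== PORT A =====
def beat (x : List Int) (y : List Int) : Option (List Int) :=
  let st := (PySem.List.pyRange 0 4 1).foldl (fun (st : Int × Int × Int) i =>
    (PySem.List.pyRange 0 4 1).foldl (fun (st : Int × Int × Int) m =>
      if PySem.List.pyGetD x i 0 > PySem.List.pyGetD y m 0 then (st.1 + 1, st.2.1, st.2.2)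
      else if PySem.List.pyGetD y m 0 > PySem.List.pyGetD x i 0 then (st.1, st.2.1 + 1, st.2.2)
      else (st.1, st.2.1, st.2.2 + 1)) st) ((0 : Int), (0 : Int), (0 : Int))
  if st.2.1 > st.1 then some y
  else if st.1 > st.2.1 then some x
  else none

-- ===== PORT B =====
-- the `for v in ys: if v < xi: lt += 1 else: break` loop of Source B
def scanLt (ys : List Int) (xi : Int) : Int :=
  match ys with
  | [] => 0
  | v :: t => if v < xi then scanLt t xi + 1 else 0

-- the `for v in reversed(ys): if v > xi: gt += 1 else: break` loop of Source B (applied to ys.reverse)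
def scanGt (ys : List Int) (xi : Int) : Int :=
  match ys with
  | [] => 0
  | v :: t => if v > xi then scanGt t xi + 1 else 0

def beat_alt (x : List Int) (y : List Int) : Option (List Int) :=
  let ys := PySem.List.sorted ((PySem.List.pyRange 0 4 1).map (fun m => PySem.List.pyGetD y m 0)) (fun v => v) false
  let p := (PySem.List.pyRange 0 4 1).foldl
    (fun (p : Int × Int) i =>
      let xi := PySem.List.pyGetD x i 0
      (p.1 + scanLt ys xi, p.2 + scanGt ys.reverse xi)) ((0 : Int), (0 : Int))
  if p.2 > p.1 then some y
  else if p.1 > p.2 then some x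
  else none

-- ===== PRECONDITION & SPEC =====
-- A indexes x[i] and y[m] for i, m in range(4): it raises IndexError unless both lists have length ≥ 4.
def Pre_beat (x : List Int) (y : List Int) : Prop := 4 ≤ x.length ∧ 4 ≤ y.length
instance (x : List Int) (y : List Int) : Decidable (Pre_beat x y) := by unfold Pre_beat; infer_instance
def pvWitness_beat : List Int × List Int := ([1, 2, 3, 4], [2, 2, 3, 1])

def Spec_beat (x : List Int) (y : List Int) (out : Option (List Int)) : Prop := out = beat_alt x y
instance (x : List Int) (y : List Int) (out : Option (List Int)) : Decidable (Spec_beat x y out) := by unfold Spec_beat; infer_instance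

-- ===== CLAIM (what is proved, stated in full; the proofs are below) =====
def Claim_equal_beat : Prop := ∀ (x : List Int) (y : List Int), Dom_beat x y → Pre_beat x y → Spec_beat x y (beat x y)

-- ===== LEMMAS =====
-- ===== LEMMAS AND PROOFS =====
def cLt (ys : List Int) (xi : Int) : Int := (ys.countP (fun v => v < xi) : Int)
def cGt (ys : List Int) (xi : Int) : Int := (ys.countP (fun v => xi < v) : Int)
def cEq (ys : List Int) (xi : Int) : Int := (ys.countP (fun v => v == xi) : Int)

lemma innerA (ys : List Int) (xi : Int) (s : Int × Int × Int) :
    ys.foldl (fun (st : Int × Int × Int) v =>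
      if xi > v then (st.1 + 1, st.2.1, st.2.2)
      else if v > xi then (st.1, st.2.1 + 1, st.2.2)
      else (st.1, st.2.1, st.2.2 + 1)) s
    = (s.1 + cLt ys xi, s.2.1 + cGt ys xi, s.2.2 + cEq ys xi) := by
  induction ys generalizing s with
  | nil => simp [cLt, cGt, cEq]
  | cons v t ih =>
    simp only [List.foldl_cons, ih, cLt, cGt, cEq, List.countP_cons]
    split_ifs <;> simp_all [Prod.ext_iff] <;> omega

lemma outerA (xs ys : List Int) (s : Int × Int × Int) :
    xs.foldl (fun (st : Int × Int × Int) xi =>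
      ys.foldl (fun (st : Int × Int × Int) v =>
        if xi > v then (st.1 + 1, st.2.1, st.2.2)
        else if v > xi then (st.1, st.2.1 + 1, st.2.2)
        else (st.1, st.2.1, st.2.2 + 1)) st) s
    = (s.1 + (xs.map (fun xi => cLt ys xi)).sum,
       s.2.1 + (xs.map (fun xi => cGt ys xi)).sum,
       s.2.2 + (xs.map (fun xi => cEq ys xi)).sum) := by
  induction xs generalizing s with
  | nil => simp
  | cons xi t ih =>
    rw [List.foldl_cons, ih, innerA]
    simp only [List.map_cons, List.sum_cons, Prod.ext_iff]
    refine ⟨by ring, by ring, by ring⟩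

lemma altFold (xs ys : List Int) (s : Int × Int) :
    xs.foldl (fun (p : Int × Int) xi => (p.1 + scanLt ys xi, p.2 + scanGt ys.reverse xi)) s
    = (s.1 + (xs.map (fun xi => scanLt ys xi)).sum,
       s.2 + (xs.map (fun xi => scanGt ys.reverse xi)).sum) := by
  induction xs generalizing s with
  | nil => simp
  | cons xi t ih =>
    rw [List.foldl_cons, ih]
    simp only [List.map_cons, List.sum_cons, Prod.ext_iff]
    exact ⟨by ring, by ring⟩

lemma scanLt_eq (ys : List Int) (xi : Int) (h : ys.Pairwise (· ≤ ·)) :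
    scanLt ys xi = cLt ys xi := by
  induction ys with
  | nil => simp [scanLt, cLt]
  | cons v t ih =>
    rcases List.pairwise_cons.mp h with ⟨hv, ht⟩
    by_cases hvx : v < xi
    · simp [scanLt, cLt, hvx, ih ht]
    · have hz : t.countP (fun w => decide (w < xi)) = 0 :=
        List.countP_eq_zero.mpr (fun w hw => by
          have := hv w hw
          simp
          omega)
      simp [scanLt, cLt, hvx, hz]

lemma scanGt_eq (ys : List Int) (xi : Int) (h : ys.Pairwise (fun a b => b ≤ a)) :
    scanGt ys xi = cGt ys xi := by
  induction ys with
  | nil => simp [scanGt, cGt]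
  | cons v t ih =>
    rcases List.pairwise_cons.mp h with ⟨hv, ht⟩
    by_cases hvx : xi < v
    · simp [scanGt, cGt, hvx, ih ht]
    · have hz : t.countP (fun w => decide (xi < w)) = 0 :=
        List.countP_eq_zero.mpr (fun w hw => by
          have := hv w hw
          simp
          omega)
      simp [scanGt, cGt, hvx, hz]

lemma pyGetD4 (a b c d : Int) (t : List Int) :
    PySem.List.pyGetD (a::b::c::d::t) 0 0 = a ∧ PySem.List.pyGetD (a::b::c::d::t) 1 0 = b ∧
    PySem.List.pyGetD (a::b::c::d::t) 2 0 = c ∧ PySem.List.pyGetD (a::b::c::d::t) 3 0 = d := by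
  refine ⟨?_, ?_, ?_, ?_⟩ <;>
    (simp [PySem.List.pyGetD, PySem.List.pyGet?, PySem.List.pyIdx?]
     rw [if_pos (by omega)]
     simp)

lemma foldIdx4 {α : Type} (F : α → Int → α) (a b c d : Int) (t : List Int) (s : α) :
    (PySem.List.pyRange 0 4 1).foldl (fun st i => F st (PySem.List.pyGetD (a::b::c::d::t) i 0)) s
    = ([a,b,c,d]).foldl F s := by
  obtain ⟨h0, h1, h2, h3⟩ := pyGetD4 a b c d t
  rw [show PySem.List.pyRange 0 4 1 = [0,1,2,3] from rfl]
  simp only [List.foldl_cons, List.foldl_nil, h0, h1, h2, h3]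

lemma mapIdx4 (a b c d : Int) (t : List Int) :
    (PySem.List.pyRange 0 4 1).map (fun m => PySem.List.pyGetD (a::b::c::d::t) m 0) = [a,b,c,d] := by
  obtain ⟨h0, h1, h2, h3⟩ := pyGetD4 a b c d t
  rw [show PySem.List.pyRange 0 4 1 = [0,1,2,3] from rfl]
  simp [h0, h1, h2, h3]

-- ===== VERDICT =====
theorem beat_spec : Claim_equal_beat := by
  intro x y _ hpre
  obtain ⟨hx, hy⟩ := hpre
  rcases x with _ | ⟨x0, x⟩; · simp at hx
  rcases x with _ | ⟨x1, x⟩; · simp at hx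
  rcases x with _ | ⟨x2, x⟩; · simp at hx
  rcases x with _ | ⟨x3, xr⟩; · simp at hx
  rcases y with _ | ⟨y0, y⟩; · simp at hy
  rcases y with _ | ⟨y1, y⟩; · simp at hy
  rcases y with _ | ⟨y2, y⟩; · simp at hy
  rcases y with _ | ⟨y3, yr⟩; · simp at hy
  unfold Spec_beat beat beat_alt
  rw [mapIdx4 y0 y1 y2 y3 yr]
  have bridgeA : (PySem.List.pyRange 0 4 1).foldl (fun (st : Int × Int × Int) i =>
        (PySem.List.pyRange 0 4 1).foldl (fun (st : Int × Int × Int) m =>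
          if PySem.List.pyGetD (x0::x1::x2::x3::xr) i 0 > PySem.List.pyGetD (y0::y1::y2::y3::yr) m 0 then
            (st.1 + 1, st.2.1, st.2.2)
          else if PySem.List.pyGetD (y0::y1::y2::y3::yr) m 0 > PySem.List.pyGetD (x0::x1::x2::x3::xr) i 0 then
            (st.1, st.2.1 + 1, st.2.2)
          else (st.1, st.2.1, st.2.2 + 1)) st) ((0 : Int), (0 : Int), (0 : Int))
      = ([x0,x1,x2,x3] : List Int).foldl (fun (st : Int × Int × Int) xi =>
          ([y0,y1,y2,y3] : List Int).foldl (fun (st : Int × Int × Int) v =>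
            if xi > v then (st.1 + 1, st.2.1, st.2.2)
            else if v > xi then (st.1, st.2.1 + 1, st.2.2)
            else (st.1, st.2.1, st.2.2 + 1)) st) ((0 : Int), (0 : Int), (0 : Int)) := by
    refine (foldIdx4 (fun (st : Int × Int × Int) xi =>
        (PySem.List.pyRange 0 4 1).foldl (fun (st : Int × Int × Int) m =>
          if xi > PySem.List.pyGetD (y0::y1::y2::y3::yr) m 0 then (st.1 + 1, st.2.1, st.2.2)
          else if PySem.List.pyGetD (y0::y1::y2::y3::yr) m 0 > xi then (st.1, st.2.1 + 1, st.2.2)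
          else (st.1, st.2.1, st.2.2 + 1)) st)
        x0 x1 x2 x3 xr _).trans ?_
    exact congrArg (fun F => List.foldl F ((0 : Int), (0 : Int), (0 : Int)) ([x0,x1,x2,x3] : List Int))
      (funext fun st => funext fun xi =>
        foldIdx4 (fun (st : Int × Int × Int) v =>
          if xi > v then (st.1 + 1, st.2.1, st.2.2)
          else if v > xi then (st.1, st.2.1 + 1, st.2.2)
          else (st.1, st.2.1, st.2.2 + 1)) y0 y1 y2 y3 yr st)
  have bridgeB : (PySem.List.pyRange 0 4 1).foldl
      (fun (p : Int × Int) i =>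
        (p.1 + scanLt (PySem.List.sorted ([y0,y1,y2,y3] : List Int) (fun v => v) false)
            (PySem.List.pyGetD (x0::x1::x2::x3::xr) i 0),
         p.2 + scanGt (PySem.List.sorted ([y0,y1,y2,y3] : List Int) (fun v => v) false).reverse
            (PySem.List.pyGetD (x0::x1::x2::x3::xr) i 0)))
      ((0 : Int), (0 : Int))
      = ([x0,x1,x2,x3] : List Int).foldl
        (fun (p : Int × Int) xi =>
          (p.1 + scanLt (PySem.List.sorted ([y0,y1,y2,y3] : List Int) (fun v => v) false) xi,
           p.2 + scanGt (PySem.List.sorted ([y0,y1,y2,y3] : List Int) (fun v => v) false).reverse xi))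
        ((0 : Int), (0 : Int)) :=
    foldIdx4 (fun (p : Int × Int) xi =>
        (p.1 + scanLt (PySem.List.sorted ([y0,y1,y2,y3] : List Int) (fun v => v) false) xi,
         p.2 + scanGt (PySem.List.sorted ([y0,y1,y2,y3] : List Int) (fun v => v) false).reverse xi))
      x0 x1 x2 x3 xr ((0 : Int), (0 : Int))
  rw [bridgeA]
  simp only [bridgeB, outerA, altFold]
  have hLt : ∀ xi, scanLt (PySem.List.sorted ([y0,y1,y2,y3] : List Int) (fun v => v) false) xi
      = cLt ([y0,y1,y2,y3] : List Int) xi := by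
    intro xi
    rw [scanLt_eq _ _ (PySem.List.sorted_pairwise ([y0,y1,y2,y3] : List Int) (fun v => v))]
    unfold cLt
    exact congrArg _ ((PySem.List.sorted_perm ([y0,y1,y2,y3] : List Int) (fun v => v) false).countP_eq _)
  have hGt : ∀ xi, scanGt (PySem.List.sorted ([y0,y1,y2,y3] : List Int) (fun v => v) false).reverse xi
      = cGt ([y0,y1,y2,y3] : List Int) xi := by
    intro xi
    rw [scanGt_eq _ _ (List.pairwise_reverse.mpr (PySem.List.sorted_pairwise ([y0,y1,y2,y3] : List Int) (fun v => v)))]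
    unfold cGt
    rw [List.countP_reverse]
    exact congrArg _ ((PySem.List.sorted_perm ([y0,y1,y2,y3] : List Int) (fun v => v) false).countP_eq _)
  simp only [hLt, hGt]
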